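-- pv_equiv track=rewrite | github.com/pypi-data/pypi-mirror-401 | packages/rockerc/rockerc-0.18.0-py2.py3-none-any.whl/rockerc/cli_args.py | parse_cli_extensions_and_positional
-- ===== SOURCE A (Python) =====
-- from typing import Any, Dict, Iterable, List, Optional, Sequence, Tuple
--
-- def parse_cli_extensions_and_positional(
--     args: Iterable[str],
-- ) -> Tuple[List[str], Optional[str], List[str]]:
--     """Parse CLI arguments into (extensions, first_positional, remainder command)."""
--     extensions: List[str] = []
--     positional: Optional[str] = None
--     command: List[str] = []
--
--     positional_found = False
--     for arg in args:
--         if isinstance(arg, str) and arg.startswith("--"):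
--             extensions.append(arg[2:])
--             continue
--         if not positional_found:
--             positional = arg
--             positional_found = True
--         else:
--             command.append(arg)
--
--     return extensions, positional, command
-- ===== SOURCE B (Python) =====
-- from typing import Iterable, List, Optional, Tuple
--
-- def parse_cli_extensions_and_positional(
--     args: Iterable[str],
-- ) -> Tuple[List[str], Optional[str], List[str]]:
--     """Parse CLI arguments into (extensions, first_positional, remainder command)."""
--     args = list(args)
--     extensions = [a[2:] for a in args if isinstance(a, str) and a.startswith("--")]
--     rest = [a for a in args if not (isinstance(a, str) and a.startswith("--"))]
--     positional = rest[0] if rest else None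
--     command = rest[1:]
--     return extensions, positional, command
-- ===== Notes on version B (the rewrite author's own statement) =====
-- stated objective: simpler
-- what changed: Replaces the single interleaved loop with a positional_found flag by a partition into extension args and the rest, then takes the head and tail of the rest as positional/command.
import Mathlib
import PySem

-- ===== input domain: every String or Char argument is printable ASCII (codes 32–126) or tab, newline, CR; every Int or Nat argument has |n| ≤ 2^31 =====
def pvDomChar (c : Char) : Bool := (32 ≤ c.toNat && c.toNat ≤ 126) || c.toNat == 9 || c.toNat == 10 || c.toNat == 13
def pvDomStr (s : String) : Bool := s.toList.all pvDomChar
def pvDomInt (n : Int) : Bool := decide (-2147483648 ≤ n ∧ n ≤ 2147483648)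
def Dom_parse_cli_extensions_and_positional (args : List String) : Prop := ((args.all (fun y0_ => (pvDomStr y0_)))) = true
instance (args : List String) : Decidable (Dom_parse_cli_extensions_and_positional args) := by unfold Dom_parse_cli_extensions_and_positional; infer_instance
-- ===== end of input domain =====

-- B partitions the args into extension flags and the rest and slices head/tail, instead of
-- A's single interleaved loop with a positional_found flag; objective: simpler.

-- ===== PORT A =====
-- A's loop state: (extensions, positional, positional_found, command)
def pvStepA (st : List String × Option String × Bool × List String) (arg : String) :
    List String × Option String × Bool × List String :=
  let (ext, pos, found, cmd) := st
  if PySem.Str.startswith arg "--" then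
    (ext ++ [PySem.Str.slice arg (some 2) none], pos, found, cmd)
  else if !found then
    (ext, some arg, true, cmd)
  else
    (ext, pos, found, cmd ++ [arg])

def parse_cli_extensions_and_positional (args : List String) :
    List String × Option String × List String :=
  let st := args.foldl pvStepA ([], none, false, [])
  (st.1, st.2.1, st.2.2.2)

-- ===== PORT B =====
def parse_cli_extensions_and_positional_alt (args : List String) :
    List String × Option String × List String :=
  let extensions := (args.filter (fun a => PySem.Str.startswith a "--")).map
      (fun a => PySem.Str.slice a (some 2) none)
  let rest := args.filter (fun a => !(PySem.Str.startswith a "--"))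
  let positional := rest.head?
  let command := PySem.List.slice rest (some 1) none
  (extensions, positional, command)

-- ===== PRECONDITION & SPEC =====
def Spec_parse_cli_extensions_and_positional (args : List String) (out : List String × Option String × List String) : Prop := out = parse_cli_extensions_and_positional_alt args
instance (args : List String) (out : List String × Option String × List String) : Decidable (Spec_parse_cli_extensions_and_positional args out) := by unfold Spec_parse_cli_extensions_and_positional; infer_instance

-- ===== CLAIM (what is proved, stated in full; the proofs are below) =====
def Claim_equal_parse_cli_extensions_and_positional : Prop := ∀ (args : List String), Dom_parse_cli_extensions_and_positional args → Spec_parse_cli_extensions_and_positional args (parse_cli_extensions_and_positional args)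

-- ===== LEMMAS AND PROOFS =====

-- abbreviations for B's two partitions, used only in the proofs
def pvExts (args : List String) : List String :=
  (args.filter (fun a => PySem.Str.startswith a "--")).map
    (fun a => PySem.Str.slice a (some 2) none)

def pvRest (args : List String) : List String :=
  args.filter (fun a => !(PySem.Str.startswith a "--"))

-- once positional is found, A only appends to extensions and command
theorem pvFoldA_found (args : List String) (ext cmd : List String) (pos : Option String) :
    args.foldl pvStepA (ext, pos, true, cmd)
      = (ext ++ pvExts args, pos, true, cmd ++ pvRest args) := by
  induction args generalizing ext cmd with
  | nil => simp [pvExts, pvRest]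
  | cons a t ih =>
    simp only [List.foldl_cons, pvStepA]
    by_cases h : PySem.Chars.startswith a.toList ['-', '-'] = true <;>
      simp [h, ih, pvExts, pvRest, List.append_assoc]

-- before positional is found (initial state), A computes B's decomposition
theorem pvFoldA_init (args : List String) (ext : List String) :
    args.foldl pvStepA (ext, none, false, [])
      = (ext ++ pvExts args, (pvRest args).head?, !(pvRest args).isEmpty, (pvRest args).tail) := by
  induction args generalizing ext with
  | nil => simp [pvExts, pvRest]
  | cons a t ih =>
    simp only [List.foldl_cons, pvStepA]
    by_cases h : PySem.Chars.startswith a.toList ['-', '-'] = true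
    · simp [h, ih, pvExts, pvRest, List.append_assoc]
    · simp [h, pvFoldA_found, pvExts, pvRest]

-- ===== VERDICT (by name: the statement is the Claim_ definition above) =====
theorem parse_cli_extensions_and_positional_spec : Claim_equal_parse_cli_extensions_and_positional := by
  intro args _
  unfold Spec_parse_cli_extensions_and_positional
  unfold parse_cli_extensions_and_positional parse_cli_extensions_and_positional_alt
  simp [pvFoldA_init args [], pvExts, pvRest, PySem.List.slice_from_one]
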